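-- pv_equiv track=rewrite | github.com/IBM/auto-contrastive-generation | autocontrastive_gen/data_processing/preprocessing_functions.py | wikinews_dataset_preprocess
-- ===== SOURCE A (Python) =====
-- def wikinews_dataset_preprocess(examples):
--     def get_main_text(news_text):
--         return sorted(news_text.split(":"), key=len)[-1].strip()
--
--     def filter_wikinews(source_text):
--         text = get_main_text(source_text)
--         return len(text.split()) > 50
--
--     def preprocess_wikinews(text):
--         main_text = get_main_text(text)
--         main_text = main_text.replace('Pillars of Wikinews writing Writing an article ', '')
--         return main_text
--
--     source_column = 'text'
--     sources = []
--     for source_text in examples[source_column]: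
--         if source_text is not None and filter_wikinews(source_text):
--             sources.append(preprocess_wikinews(source_text))
--
--     new_examples = {
--         source_column: sources,
--     }
--
--     return new_examples
-- ===== SOURCE B (Python) =====
-- def wikinews_dataset_preprocess(examples):
--     marker = 'Pillars of Wikinews writing Writing an article '
--     sources = []
--     for source_text in examples['text']:
--         if source_text is None:
--             continue
--         segments = source_text.split(':')
--         best = segments[0]
--         for seg in segments[1:]:
--             if len(best) <= len(seg):
--                 best = seg
--         main_text = best.strip()
--         if len(main_text.split()) > 50:
--             sources.append(main_text.replace(marker, ''))
--     return {'text': sources}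
-- ===== Notes on version B (the rewrite author's own statement) =====
-- stated objective: simpler
-- what changed: Selecting the longest ':'-segment by sorting the segments and taking the last one is replaced by a single linear scan that keeps the last longest segment (>= tie-break), and the main text is computed once per entry instead of twice (for the filter and the preprocess).
import Mathlib
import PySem

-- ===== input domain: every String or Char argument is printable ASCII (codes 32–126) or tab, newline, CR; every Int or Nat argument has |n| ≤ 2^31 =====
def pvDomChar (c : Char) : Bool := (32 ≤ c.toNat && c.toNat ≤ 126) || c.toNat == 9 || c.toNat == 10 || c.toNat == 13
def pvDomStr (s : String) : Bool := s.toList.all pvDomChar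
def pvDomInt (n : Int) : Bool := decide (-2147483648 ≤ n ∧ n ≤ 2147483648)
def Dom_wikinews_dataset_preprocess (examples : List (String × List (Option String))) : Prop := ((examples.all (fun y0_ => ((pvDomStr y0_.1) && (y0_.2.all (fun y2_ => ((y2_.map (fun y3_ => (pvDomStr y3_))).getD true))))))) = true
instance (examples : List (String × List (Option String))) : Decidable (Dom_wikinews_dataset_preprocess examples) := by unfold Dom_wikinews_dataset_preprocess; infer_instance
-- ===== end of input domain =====

-- B replaces A's sort-then-take-last selection of the longest ':'-segment by a single
-- linear scan keeping the last longest segment, computed once per text (objective: simpler).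

-- ===== PORT A =====
-- sorted(news_text.split(":"), key=len)[-1].strip()
-- (':' ≠ '', so split? always returns some and split(':') is never empty; the
--  '.getD []' / '.getD ""' defaults are never taken.)
def pvGetMainTextA (news_text : String) : String :=
  PySem.Str.strip
    ((PySem.List.pyGet? (PySem.List.sorted ((PySem.Str.split? news_text ":").getD []) PySem.Str.len) (-1)).getD "")

-- len(text.split()) > 50
def pvFilterWikinewsA (source_text : String) : Bool :=
  (PySem.Str.split₀ (pvGetMainTextA source_text)).length > 50

-- main_text.replace('Pillars of Wikinews writing Writing an article ', '')
def pvPreprocessWikinewsA (text : String) : String :=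
  PySem.Str.replace (pvGetMainTextA text) "Pillars of Wikinews writing Writing an article " ""

-- examples['text'] is first-match lookup (KeyError excluded by Pre_; the [] default is never taken inside Pre_)
def wikinews_dataset_preprocess (examples : List (String × List (Option String))) : List (String × List String) :=
  let texts := ((examples.find? (fun p => p.1 == "text")).map Prod.snd).getD []
  let sources := texts.foldl (fun acc source_text =>
    match source_text with
    | some t => if pvFilterWikinewsA t then acc ++ [pvPreprocessWikinewsA t] else acc
    | none => acc) []
  [("text", sources)]

-- ===== PORT B =====
-- best = segments[0]; for seg in segments[1:]: if len(best) <= len(seg): best = seg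
-- (split(':') is never empty, so the [] branch is unreachable)
def pvBestSegment (source_text : String) : String :=
  match (PySem.Str.split? source_text ":").getD [] with
  | [] => ""
  | h :: t => t.foldl (fun best seg => if PySem.Str.len best ≤ PySem.Str.len seg then seg else best) h

def wikinews_dataset_preprocess_alt (examples : List (String × List (Option String))) : List (String × List String) :=
  let texts := ((examples.find? (fun p => p.1 == "text")).map Prod.snd).getD []
  let sources := texts.foldl (fun acc source_text =>
    match source_text with
    | some t =>
        let main_text := PySem.Str.strip (pvBestSegment t)
        if (PySem.Str.split₀ main_text).length > 50
        then acc ++ [PySem.Str.replace main_text "Pillars of Wikinews writing Writing an article " ""]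
        else acc
    | none => acc) []
  [("text", sources)]

-- ===== PRECONDITION & SPEC =====
-- Pre_: the input dict must carry the key 'text'; otherwise Python A raises KeyError.
def Pre_wikinews_dataset_preprocess (examples : List (String × List (Option String))) : Prop :=
  (examples.find? (fun p => p.1 == "text")).isSome = true
instance (examples : List (String × List (Option String))) : Decidable (Pre_wikinews_dataset_preprocess examples) := by unfold Pre_wikinews_dataset_preprocess; infer_instance

def pvWitness_wikinews_dataset_preprocess : (List (String × List (Option String))) :=
  [("text", [some "a:bb", none])]

def Spec_wikinews_dataset_preprocess (examples : List (String × List (Option String))) (out : List (String × List String)) : Prop := out = wikinews_dataset_preprocess_alt examples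
instance (examples : List (String × List (Option String))) (out : List (String × List String)) : Decidable (Spec_wikinews_dataset_preprocess examples out) := by unfold Spec_wikinews_dataset_preprocess; infer_instance

-- ===== CLAIM (what is proved, stated in full; the proofs are below) =====
def Claim_equal_wikinews_dataset_preprocess : Prop := ∀ (examples : List (String × List (Option String))), Dom_wikinews_dataset_preprocess examples → Pre_wikinews_dataset_preprocess examples → Spec_wikinews_dataset_preprocess examples (wikinews_dataset_preprocess examples)

-- ===== LEMMAS AND PROOFS =====

-- one insertion step of the stable insertion sort keeps the shape zs ++ [last], where the
-- new last element is exactly B's scan step, and keeps the list sorted by the key f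
theorem pv_insertBy_last (f : String → Int) (x : String) : ∀ (ys : List String) (b : String),
    List.Pairwise (fun a c => f a ≤ f c) (ys ++ [b]) →
    ∃ zs, PySem.List.insertBy (fun a c => decide (f a < f c)) x (ys ++ [b])
            = zs ++ [if f b ≤ f x then x else b] ∧
          List.Pairwise (fun a c => f a ≤ f c) (zs ++ [if f b ≤ f x then x else b]) := by
  intro ys
  induction ys with
  | nil =>
    intro b _
    by_cases hlt : f x < f b
    · refine ⟨[x], ?_, ?_⟩
      · simp only [List.nil_append, PySem.List.insertBy, decide_eq_true_eq]
        rw [if_pos hlt, if_neg (by omega)]; rfl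
      · rw [if_neg (by omega)]; simp; omega
    · refine ⟨[b], ?_, ?_⟩
      · simp only [List.nil_append, PySem.List.insertBy, decide_eq_true_eq]
        rw [if_neg hlt, if_pos (by omega)]; rfl
      · rw [if_pos (by omega)]; simp; omega
  | cons y ys ih =>
    intro b hpw
    rw [List.cons_append, List.pairwise_cons] at hpw
    obtain ⟨hy, hpw'⟩ := hpw
    by_cases hlt : f x < f y
    · have hyb : f y ≤ f b := hy b (by simp)
      refine ⟨x :: y :: ys, ?_, ?_⟩
      · simp only [List.cons_append, PySem.List.insertBy, decide_eq_true_eq]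
        rw [if_pos hlt, if_neg (by omega)]
      · rw [if_neg (by omega)]
        simp only [List.cons_append, List.pairwise_cons]
        refine ⟨?_, hy, hpw'⟩
        intro z hz
        rcases List.mem_cons.mp hz with rfl | hz
        · omega
        · have := hy z hz; omega
    · obtain ⟨zs, heq, hpwz⟩ := ih b hpw'
      refine ⟨y :: zs, ?_, ?_⟩
      · simp only [List.cons_append, PySem.List.insertBy, decide_eq_true_eq]
        rw [if_neg hlt, heq]
      · simp only [List.cons_append, List.pairwise_cons]
        refine ⟨?_, hpwz⟩
        intro z hz
        have hz' : z ∈ PySem.List.insertBy (fun a c => decide (f a < f c)) x (ys ++ [b]) := by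
          rw [heq]; exact hz
        rcases (PySem.List.mem_insertBy _ _ _ _).mp hz' with rfl | hz'
        · omega
        · exact hy z hz'

-- pushing a whole list through the insertion sort from a sorted zs ++ [b]:
-- the last element of the result is B's left fold
theorem pv_foldl_insertBy_last (f : String → Int) : ∀ (xs zs : List String) (b : String),
    List.Pairwise (fun a c => f a ≤ f c) (zs ++ [b]) →
    ∃ ws, xs.foldl (fun acc x =>
            PySem.List.insertBy (fun a c => decide (f a < f c)) x acc) (zs ++ [b])
          = ws ++ [xs.foldl (fun best seg => if f best ≤ f seg then seg else best) b] := by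
  intro xs
  induction xs with
  | nil => intro zs b _; exact ⟨zs, rfl⟩
  | cons x xs ih =>
    intro zs b hpw
    obtain ⟨zs', heq, hpw'⟩ := pv_insertBy_last f x zs b hpw
    simp only [List.foldl_cons]
    rw [heq]
    exact ih zs' _ hpw'

-- A's sort-then-[-1]-then-strip equals B's scan-then-strip
theorem pv_main_text_eq (s : String) :
    pvGetMainTextA s = PySem.Str.strip (pvBestSegment s) := by
  unfold pvGetMainTextA pvBestSegment
  cases hsp : (PySem.Str.split? s ":").getD [] with
  | nil => rfl
  | cons h t =>
    rw [PySem.List.sorted_eq_foldl_insertBy]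
    have h0 : PySem.List.insertBy
        (fun a c => decide (PySem.Str.len a < PySem.Str.len c)) h ([] : List String)
        = [] ++ [h] := rfl
    obtain ⟨ws, hw⟩ := pv_foldl_insertBy_last PySem.Str.len t [] h (by simp)
    simp only [List.foldl_cons, h0]
    rw [hw, PySem.List.pyGet?_neg_one_append_singleton]
    rfl

-- ===== VERDICT (by name: the statement is the Claim_ definition above) =====
theorem wikinews_dataset_preprocess_spec : Claim_equal_wikinews_dataset_preprocess := by
  intro examples _ _
  unfold Spec_wikinews_dataset_preprocess
  unfold wikinews_dataset_preprocess wikinews_dataset_preprocess_alt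
  have hstep : (fun (acc : List String) (source_text : Option String) =>
      match source_text with
      | some t => if pvFilterWikinewsA t then acc ++ [pvPreprocessWikinewsA t] else acc
      | none => acc)
      = (fun (acc : List String) (source_text : Option String) =>
      match source_text with
      | some t =>
          let main_text := PySem.Str.strip (pvBestSegment t)
          if (PySem.Str.split₀ main_text).length > 50
          then acc ++ [PySem.Str.replace main_text "Pillars of Wikinews writing Writing an article " ""]
          else acc
      | none => acc) := by
    funext acc o
    cases o with
    | none => rfl
    | some t => simp [pvFilterWikinewsA, pvPreprocessWikinewsA, pv_main_text_eq]
  rw [hstep]
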